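-- pv_equiv track=rewrite | github.com/junwoo091400/MyCODES | Assignmnets_small/2018_Algorithm_Class/getStirng_and_ASCII_fibonacci_etc/Recursion_assignment.py | find_ASCII_minMax_from_string
-- ===== SOURCE A (Python) =====
-- def find_ASCII_minMax_from_string(stringy):
-- 	ASC_min = 255
-- 	ASC_max = 0
-- 	for segment in stringy:
-- 		if(ord(segment) < ASC_min):
-- 			ASC_min = ord(segment)
-- 		if(ord(segment) > ASC_max):
-- 			ASC_max = ord(segment)
-- 	return (ASC_min, ASC_max)
-- ===== SOURCE B (Python) =====
-- def find_ASCII_minMax_from_string(stringy):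
--     codes = sorted(ord(c) for c in stringy)
--     if not codes:
--         return (255, 0)
--     return (codes[0], codes[-1])
-- ===== Notes on version B (the rewrite author's own statement) =====
-- stated objective: alternative
-- what changed: Instead of one loop tracking running min/max, B sorts the ASCII codes once and returns the first and last element of the sorted list ((255,0) when empty).
import Mathlib
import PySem

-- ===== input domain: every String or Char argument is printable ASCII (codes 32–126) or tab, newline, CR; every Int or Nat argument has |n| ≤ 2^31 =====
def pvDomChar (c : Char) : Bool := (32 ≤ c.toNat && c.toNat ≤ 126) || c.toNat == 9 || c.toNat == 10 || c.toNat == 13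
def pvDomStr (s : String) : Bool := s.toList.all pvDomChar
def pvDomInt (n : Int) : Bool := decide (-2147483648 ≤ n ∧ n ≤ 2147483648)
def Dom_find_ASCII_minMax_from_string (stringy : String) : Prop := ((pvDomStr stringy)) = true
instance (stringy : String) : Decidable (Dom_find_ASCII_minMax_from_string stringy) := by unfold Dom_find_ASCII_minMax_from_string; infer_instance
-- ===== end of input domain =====

-- B sorts the ASCII codes once and returns the ends of the sorted list instead of A's running min/max loop (alternative algorithm).

-- ===== PORT A =====
-- one loop over the characters, updating the running min and max with two ifs
def find_ASCII_minMax_from_string (stringy : String) : Int × Int :=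
  stringy.toList.foldl
    (fun st segment =>
      let st1 : Int × Int :=
        if (segment.toNat : Int) < st.1 then ((segment.toNat : Int), st.2) else st
      if (segment.toNat : Int) > st1.2 then (st1.1, (segment.toNat : Int)) else st1)
    (255, 0)

-- ===== PORT B =====
-- codes = sorted(ord(c) for c in stringy); empty -> (255, 0); else (codes[0], codes[-1])
def find_ASCII_minMax_from_string_alt (stringy : String) : Int × Int :=
  let codes := PySem.List.sorted (stringy.toList.map (fun c => (c.toNat : Int))) (fun x => x) false
  match codes with
  | [] => (255, 0)
  | x :: xs => (x, (x :: xs).getLast (List.cons_ne_nil _ _))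

-- ===== PRECONDITION & SPEC =====
def Spec_find_ASCII_minMax_from_string (stringy : String) (out : Int × Int) : Prop := out = find_ASCII_minMax_from_string_alt stringy
instance (stringy : String) (out : Int × Int) : Decidable (Spec_find_ASCII_minMax_from_string stringy out) := by unfold Spec_find_ASCII_minMax_from_string; infer_instance

-- ===== CLAIM =====
def Claim_equal_find_ASCII_minMax_from_string : Prop := ∀ (stringy : String), Dom_find_ASCII_minMax_from_string stringy → Spec_find_ASCII_minMax_from_string stringy (find_ASCII_minMax_from_string stringy)

-- ===== LEMMAS AND PROOFS =====

-- A's loop is exactly the pair of running folds with min and max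
theorem pvFoldA_eq (l : List Char) (mn mx : Int) :
    l.foldl
      (fun st segment =>
        let st1 : Int × Int :=
          if (segment.toNat : Int) < st.1 then ((segment.toNat : Int), st.2) else st
        if (segment.toNat : Int) > st1.2 then (st1.1, (segment.toNat : Int)) else st1)
      (mn, mx)
    = ((l.map (fun c => (c.toNat : Int))).foldl min mn,
       (l.map (fun c => (c.toNat : Int))).foldl max mx) := by
  induction l generalizing mn mx with
  | nil => rfl
  | cons c t ih =>
      simp only [List.foldl_cons, List.map_cons]
      split_ifs <;> rw [ih] <;> simp only [Prod.mk.injEq] <;>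
        refine ⟨?_, ?_⟩ <;> congr 1 <;> simp_all <;> omega

-- foldl min from an element ≤ all the rest stays at that element
theorem pvFoldlMin_sorted (x : Int) (xs : List Int)
    (h : (x :: xs).Pairwise (· ≤ ·)) : xs.foldl min x = x := by
  induction xs with
  | nil => rfl
  | cons y t ih =>
      simp only [List.pairwise_cons] at h ⊢
      have hxy : x ≤ y := h.1 y (List.mem_cons_self ..)
      have : (x :: t).Pairwise (· ≤ ·) := by
        refine List.pairwise_cons.mpr ⟨fun z hz => h.1 z (List.mem_cons_of_mem _ hz), h.2.2⟩
      simpa [min_eq_left hxy] using ih this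

-- foldl max over a ≤-sorted list reaches its last element
theorem pvFoldlMax_sorted (x : Int) (xs : List Int)
    (h : (x :: xs).Pairwise (· ≤ ·)) :
    xs.foldl max x = (x :: xs).getLast (List.cons_ne_nil _ _) := by
  induction xs generalizing x with
  | nil => rfl
  | cons y t ih =>
      have hxy : x ≤ y := (List.pairwise_cons.mp h).1 y (List.mem_cons_self ..)
      have h' : (y :: t).Pairwise (· ≤ ·) := (List.pairwise_cons.mp h).2
      simp only [List.foldl_cons, max_eq_right hxy]
      rw [ih y h']
      simp [List.getLast]

-- folds with min/max are invariant under permutation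
theorem pvFoldlMin_perm (a : Int) {l l' : List Int} (h : l.Perm l') :
    l.foldl min a = l'.foldl min a :=
  @List.Perm.foldl_eq _ _ min _ _ ⟨fun b x y => by omega⟩ h a

theorem pvFoldlMax_perm (a : Int) {l l' : List Int} (h : l.Perm l') :
    l.foldl max a = l'.foldl max a :=
  @List.Perm.foldl_eq _ _ max _ _ ⟨fun b x y => by omega⟩ h a

theorem find_ASCII_minMax_from_string_spec : Claim_equal_find_ASCII_minMax_from_string := by
  intro s hDom
  unfold Spec_find_ASCII_minMax_from_string find_ASCII_minMax_from_string find_ASCII_minMax_from_string_alt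
  rw [pvFoldA_eq]
  set M := s.toList.map (fun c => (c.toNat : Int)) with hM
  have hperm : (PySem.List.sorted M (fun x => x) false).Perm M := PySem.List.sorted_perm ..
  have hpw : (PySem.List.sorted M (fun x => x) false).Pairwise (· ≤ ·) := by
    simpa using PySem.List.sorted_pairwise (xs := M) (key := fun x => x)
  rw [pvFoldlMin_perm 255 hperm.symm, pvFoldlMax_perm 0 hperm.symm]
  cases hS : PySem.List.sorted M (fun x => x) false with
  | nil => simp
  | cons x xs =>
      rw [hS] at hpw
      have hxM : x ∈ M := (hperm.mem_iff).mp (by rw [hS]; exact List.mem_cons_self ..)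
      have hxb : 0 ≤ x ∧ x ≤ 255 := by
        rw [hM] at hxM
        obtain ⟨c, hc, rfl⟩ := List.mem_map.mp hxM
        have := List.all_eq_true.mp hDom c hc
        unfold pvDomChar at this
        simp at this
        omega
      simp only [List.foldl_cons]
      have h1 : min (255 : Int) x = x := min_eq_right (by omega)
      have h2 : max (0 : Int) x = x := max_eq_right (by omega)
      rw [h1, h2, pvFoldlMin_sorted x xs hpw, pvFoldlMax_sorted x xs hpw]
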